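-- pv_equiv track=rewrite | github.com/jameskhedley/advent-of-code-solutions | 2025/day10.py | mutatep1
-- ===== SOURCE A (Python) =====
-- def mutatep1(state, move):
--     new_state = list(state)
--     for light in move:
--         if new_state[light]:
--             new_state[light] = False
--         else:
--             new_state[light] = True
--     return tuple(new_state)
-- ===== SOURCE B (Python) =====
-- def mutatep1(state, move):
--     n = len(state)
--     counts = {}
--     for light in move:
--         i = light + n if light < 0 else light
--         counts[i] = counts.get(i, 0) + 1
--     new_state = list(state)
--     for i, c in counts.items():
--         if c % 2 == 1:
--             new_state[i] = not new_state[i]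
--     return tuple(new_state)
-- ===== Notes on version B (the rewrite author's own statement) =====
-- stated objective: alternative
-- what changed: B replaces A's per-move sequential toggle with a parity pass: it counts occurrences of each normalized index in a dict, then flips each distinct index once iff its count is odd.
import Mathlib
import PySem

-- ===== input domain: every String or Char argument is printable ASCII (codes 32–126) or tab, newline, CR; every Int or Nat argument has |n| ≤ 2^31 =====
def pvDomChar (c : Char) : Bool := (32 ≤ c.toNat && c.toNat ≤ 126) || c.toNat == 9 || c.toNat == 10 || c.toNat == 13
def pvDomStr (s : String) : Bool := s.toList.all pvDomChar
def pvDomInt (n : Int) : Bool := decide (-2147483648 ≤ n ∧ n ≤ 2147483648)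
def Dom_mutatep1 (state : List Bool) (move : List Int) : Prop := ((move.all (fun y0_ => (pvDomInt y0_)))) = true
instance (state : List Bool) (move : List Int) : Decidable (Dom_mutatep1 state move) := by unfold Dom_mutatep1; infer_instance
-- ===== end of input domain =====

-- B replaces A's per-move sequential toggle by a parity pass over a dict of index counts; same asymptotic cost, different decomposition.

-- ===== PORT A =====
def mutatep1 (state : List Bool) (move : List Int) : List Bool :=
  move.foldl (fun new_state light =>
    if PySem.List.pyGetD new_state light false
    then PySem.List.pySetD new_state light false
    else PySem.List.pySetD new_state light true) state

-- ===== PORT B =====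
def mutatep1_alt (state : List Bool) (move : List Int) : List Bool :=
  let n : Int := state.length
  let counts : PySem.Dict Int Int :=
    move.foldl (fun d light =>
      let i := if light < 0 then light + n else light
      d.insert i (d.getD i 0 + 1)) PySem.Dict.empty
  counts.items.foldl (fun new_state p =>
    if PySem.Int.mod p.2 2 == 1
    then PySem.List.pySetD new_state p.1 (!(PySem.List.pyGetD new_state p.1 false))
    else new_state) state

-- ===== PRECONDITION & SPEC =====
-- Pre_ excludes exactly the out-of-range indices on which A raises IndexError.
def Pre_mutatep1 (state : List Bool) (move : List Int) : Prop :=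
  ∀ l ∈ move, PySem.Raise.InRange state.length l
instance (state : List Bool) (move : List Int) : Decidable (Pre_mutatep1 state move) := by
  unfold Pre_mutatep1; infer_instance
def pvWitness_mutatep1 : List Bool × List Int := ([true, false, true], [0, -1, 2, 0, 1])

def Spec_mutatep1 (state : List Bool) (move : List Int) (out : List Bool) : Prop := out = mutatep1_alt state move
instance (state : List Bool) (move : List Int) (out : List Bool) : Decidable (Spec_mutatep1 state move out) := by unfold Spec_mutatep1; infer_instance

-- ===== CLAIM (what is proved, stated in full; the proofs are below) =====
def Claim_equal_mutatep1 : Prop := ∀ (state : List Bool) (move : List Int), Dom_mutatep1 state move → Pre_mutatep1 state move → Spec_mutatep1 state move (mutatep1 state move)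

-- ===== LEMMAS AND PROOFS =====

-- the normalized (nonnegative) index Python uses for an in-range, possibly negative, index
def normIdx (n : Nat) (l : Int) : Nat := (if l < 0 then l + n else l).toNat

-- elementary toggle at a Nat index
def tog (xs : List Bool) (k : Nat) : List Bool := xs.set k (!xs.getD k false)

-- B's per-item step, named for the lemmas below
def stepB (ns : List Bool) (p : Int × Int) : List Bool :=
  if PySem.Int.mod p.2 2 == 1
  then PySem.List.pySetD ns p.1 (!(PySem.List.pyGetD ns p.1 false))
  else ns

lemma inRange_iff {n : Nat} {l : Int} : PySem.Raise.InRange n l ↔ -(n : Int) ≤ l ∧ l < n := by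
  simp [PySem.Raise.InRange]

lemma pyGetD_norm {xs : List Bool} {l : Int} (h : PySem.Raise.InRange xs.length l) (d : Bool) :
    PySem.List.pyGetD xs l d = xs.getD (normIdx xs.length l) d := by
  obtain ⟨h1, h2⟩ := inRange_iff.mp h
  by_cases hl : l < 0
  · have he : xs.length - (-l).toNat = (l + xs.length).toNat := by omega
    simp [PySem.List.pyGetD, PySem.List.pyGet?, PySem.List.pyIdx?, normIdx,
      not_le.mpr hl, h1, hl, he, List.getD]
  · simp [PySem.List.pyGetD, PySem.List.pyGet?, PySem.List.pyIdx?, normIdx,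
      not_lt.mp hl, h2, hl, List.getD]

lemma pySetD_norm {xs : List Bool} {l : Int} (h : PySem.Raise.InRange xs.length l) (v : Bool) :
    PySem.List.pySetD xs l v = xs.set (normIdx xs.length l) v := by
  obtain ⟨h1, h2⟩ := inRange_iff.mp h
  by_cases hl : l < 0
  · have he : xs.length - (-l).toNat = (l + xs.length).toNat := by omega
    simp [PySem.List.pySetD, PySem.List.pySet?, PySem.List.pyIdx?, normIdx,
      not_le.mpr hl, h1, hl, he]
  · simp [PySem.List.pySetD, PySem.List.pySet?, PySem.List.pyIdx?, normIdx,
      not_lt.mp hl, h2, hl]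

lemma length_tog (xs : List Bool) (k : Nat) : (tog xs k).length = xs.length := by
  simp [tog]

lemma getD_tog (xs : List Bool) (k j : Nat) (hj : j < xs.length) :
    (tog xs k).getD j false = if k = j then !(xs.getD j false) else xs.getD j false := by
  by_cases h : k = j
  · subst h; simp [tog, List.getD_eq_getElem?_getD, hj]
  · simp [tog, List.getD_eq_getElem?_getD, h]

-- A's fold is the Nat-index toggle fold over the normalized move list
lemma foldA_eq (move : List Int) (xs : List Bool)
    (h : ∀ l ∈ move, PySem.Raise.InRange xs.length l) :
    move.foldl (fun ns light =>
      if PySem.List.pyGetD ns light false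
      then PySem.List.pySetD ns light false
      else PySem.List.pySetD ns light true) xs
    = (move.map (fun l => normIdx xs.length l)).foldl tog xs := by
  induction move generalizing xs with
  | nil => rfl
  | cons l ms ih =>
    have hl := h l (by simp)
    have hstep : (if PySem.List.pyGetD xs l false
        then PySem.List.pySetD xs l false
        else PySem.List.pySetD xs l true) = tog xs (normIdx xs.length l) := by
      rw [pyGetD_norm hl, pySetD_norm hl, pySetD_norm hl]
      unfold tog
      cases h' : xs.getD (normIdx xs.length l) false <;> simp
    rw [List.map_cons, List.foldl_cons, List.foldl_cons, hstep,
      ih (tog xs (normIdx xs.length l)) (by simpa [length_tog] using fun x hx => h x (by simp [hx]))]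
    simp [length_tog]

lemma length_foldl_tog (ks : List Nat) (xs : List Bool) :
    (ks.foldl tog xs).length = xs.length := by
  induction ks generalizing xs with
  | nil => rfl
  | cons k ks ih => simp [List.foldl_cons, ih, length_tog]

-- parity characterisation of the toggle fold
lemma getD_foldl_tog (ks : List Nat) (xs : List Bool) (j : Nat) (hj : j < xs.length) :
    (ks.foldl tog xs).getD j false = xor (decide (ks.count j % 2 = 1)) (xs.getD j false) := by
  induction ks generalizing xs with
  | nil => simp
  | cons k ks ih =>
    rw [List.foldl_cons, ih _ (by simpa [tog] using hj), getD_tog xs k j hj]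
    by_cases h : k = j
    · subst h
      rcases Nat.mod_two_eq_zero_or_one (ks.count k) with hc | hc <;>
        simp [List.count_cons_self, Nat.add_mod, hc]
    · simp [h]

lemma length_stepB (xs : List Bool) (p : Int × Int) : (stepB xs p).length = xs.length := by
  unfold stepB; split <;> simp [PySem.List.length_pySetD]

lemma length_foldl_stepB (ps : List (Int × Int)) (xs : List Bool) :
    (ps.foldl stepB xs).length = xs.length := by
  induction ps generalizing xs with
  | nil => rfl
  | cons p ps ih => simp [List.foldl_cons, ih, length_stepB]

lemma stepB_eq_tog (xs : List Bool) (p : Int × Int) (h0 : 0 ≤ p.1) (h1 : p.1 < (xs.length : Int))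
    (hm : (PySem.Int.mod p.2 2 == 1) = true) :
    stepB xs p = tog xs p.1.toNat := by
  have hr : PySem.Raise.InRange xs.length p.1 := inRange_iff.mpr ⟨by omega, h1⟩
  have hn : normIdx xs.length p.1 = p.1.toNat := by simp [normIdx, not_lt.mpr h0]
  unfold stepB
  simp only [hm, if_true]
  rw [pySetD_norm hr, pyGetD_norm hr, hn]
  rfl

-- parity characterisation of B's fold over distinct in-range keys
lemma getD_foldl_stepB (ps : List (Int × Int)) (xs : List Bool) (j : Nat) (hj : j < xs.length)
    (hnd : (ps.map Prod.fst).Nodup)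
    (hrange : ∀ p ∈ ps, 0 ≤ p.1 ∧ p.1 < (xs.length : Int)) :
    (ps.foldl stepB xs).getD j false
      = xor (ps.any (fun p => p.1 == (j : Int) && (PySem.Int.mod p.2 2 == 1))) (xs.getD j false) := by
  induction ps generalizing xs with
  | nil => simp
  | cons p ps ih =>
    obtain ⟨hp0, hp1⟩ := hrange p (by simp)
    have htail : ∀ q ∈ ps, 0 ≤ q.1 ∧ q.1 < ((stepB xs p).length : Int) := by
      intro q hq; rw [length_stepB]; exact hrange q (by simp [hq])
    rw [List.foldl_cons,
      ih (stepB xs p) (by simpa [length_stepB] using hj) (by simpa using hnd.of_cons) htail]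
    by_cases hm : (PySem.Int.mod p.2 2 == 1) = true
    · rw [stepB_eq_tog xs p hp0 hp1 hm, getD_tog xs p.1.toNat j hj]
      by_cases h : p.1.toNat = j
      · have hpj : p.1 = (j : Int) := by omega
        have hany : ps.any (fun q => q.1 == (j : Int) && (PySem.Int.mod q.2 2 == 1)) = false := by
          rw [List.any_eq_false]
          intro q hq
          have hne : q.1 ≠ p.1 := by
            have := (List.nodup_cons.mp hnd).1
            intro e
            exact this (by simpa [e] using List.mem_map_of_mem (f := Prod.fst) hq)
          have : (q.1 == (j : Int)) = false := by
            rw [beq_eq_false_iff_ne]; rw [hpj] at hne; exact hne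
          simp [this]
        rw [if_pos h]
        simp only [List.any_cons, hany, hpj, hm, beq_self_eq_true, Bool.true_and,
          Bool.or_false, Bool.false_xor, Bool.true_xor]
      · have hpj : (p.1 == (j : Int)) = false := by
          rw [beq_eq_false_iff_ne]; omega
        rw [if_neg h]
        simp only [List.any_cons, hpj, Bool.false_and, Bool.false_or]
    · have hb : stepB xs p = xs := by unfold stepB; rw [if_neg hm]
      have hm' : (PySem.Int.mod p.2 2 == 1) = false := by
        simpa using hm
      rw [hb]
      simp only [List.any_cons, hm', Bool.and_false, Bool.false_or]

-- 'any' over an association list built from distinct keys collapses to a lookup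
lemma any_keyed (s : List Int) (j : Int) (g : Int → Bool) :
    s.any (fun k => k == j && g k) = (s.contains j && g j) := by
  induction s with
  | nil => simp
  | cons k s ih =>
    by_cases h : k = j
    · subst h; simp [ih]
    · simp [ih, beq_iff_eq, h, (show ¬ j = k from fun e => h e.symm)]

lemma mod_cast_two (m : Nat) : (PySem.Int.mod (m : Int) 2 == 1) = decide (m % 2 = 1) := by
  have h := PySem.Int.mod_natCast m 2
  simp only [Nat.cast_ofNat] at h
  rw [h]
  exact decide_eq_decide.mpr (by omega)

-- counting normalized Nat indices = counting normalized Int indices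
lemma count_map_normIdx (move : List Int) (n : Nat) (j : Nat) (hj : j < n)
    (h : ∀ l ∈ move, PySem.Raise.InRange n l) :
    (move.map (fun l => normIdx n l)).count j
    = (move.map (fun l => if l < 0 then l + (n : Int) else l)).count (j : Int) := by
  induction move with
  | nil => rfl
  | cons l ms ih =>
    obtain ⟨h1, h2⟩ := inRange_iff.mp (h l (by simp))
    have ih' := ih (fun x hx => h x (by simp [hx]))
    have hiff : (normIdx n l = j) ↔ ((if l < 0 then l + (n : Int) else l) = (j : Int)) := by
      unfold normIdx; split <;> omega
    simp only [List.map_cons, List.count_cons, ih']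
    congr 1
    by_cases hc : normIdx n l = j
    · simp [hc, hiff.mp hc]
    · simp [hc]
      exact fun e => hc (hiff.mpr e)

-- ===== VERDICT (by name: the statement is the Claim_ definition above) =====
theorem mutatep1_spec : Claim_equal_mutatep1 := by
  intro state move _ hpre
  unfold Spec_mutatep1 mutatep1 mutatep1_alt
  set n : Nat := state.length with hn
  -- B's dict is the counter of the normalized move list
  set ms : List Int := move.map (fun l => if l < 0 then l + (n : Int) else l) with hms
  have hcounts : move.foldl (fun (d : PySem.Dict Int Int) light =>
      let i := if light < 0 then light + (n : Int) else light
      d.insert i (d.getD i 0 + 1)) PySem.Dict.empty = PySem.Dict.counter ms := by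
    rw [← PySem.Dict.foldl_insert_getD_add_one_eq_counter, hms, List.foldl_map]
  simp only [hcounts, PySem.Dict.items_counter]
  rw [show (fun (new_state : List Bool) (p : Int × Int) =>
    if PySem.Int.mod p.2 2 == 1
    then PySem.List.pySetD new_state p.1 (!(PySem.List.pyGetD new_state p.1 false))
    else new_state) = stepB from rfl]
  set ps : List (Int × Int) := (PySem.Set.ofList ms).map (fun k => (k, (ms.count k : Int))) with hps
  set ks : List Nat := move.map (fun l => normIdx n l) with hks
  rw [foldA_eq move state hpre]
  have hlenA : ((ks.foldl tog state)).length = n := length_foldl_tog ks state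
  have hlenB : (ps.foldl stepB state).length = n := length_foldl_stepB ps state
  have hndps : (ps.map Prod.fst).Nodup := by
    have h2 : (Prod.fst ∘ fun k : Int => (k, ((ms.count k : Int)))) = id := rfl
    rw [hps, List.map_map, h2, List.map_id]
    exact PySem.Set.nodup_ofList ms
  have hrange : ∀ p ∈ ps, 0 ≤ p.1 ∧ p.1 < ((state.length : Int)) := by
    intro p hp
    rw [hps] at hp
    obtain ⟨k, hk, rfl⟩ := List.mem_map.mp hp
    have hk' : k ∈ ms := (PySem.Set.mem_ofList ms k).mp hk
    rw [hms] at hk'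
    obtain ⟨l, hl, rfl⟩ := List.mem_map.mp hk'
    obtain ⟨h1, h2⟩ := inRange_iff.mp (hpre l hl)
    constructor <;> [split <;> omega; split <;> omega]
  apply List.ext_getElem (by rw [hlenA, hlenB])
  intro j hj1 hj2
  have hj : j < state.length := by omega
  rw [← List.getD_eq_getElem (ks.foldl tog state) false (by omega),
      ← List.getD_eq_getElem (ps.foldl stepB state) false (by omega)]
  show (ks.foldl tog state).getD j false = (ps.foldl stepB state).getD j false
  rw [getD_foldl_tog ks state j hj, getD_foldl_stepB ps state j hj hndps hrange]
  congr 1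
  -- reduce B's 'any' to the parity of the count
  rw [hps, List.any_map]
  have : ((PySem.Set.ofList ms).any
      ((fun p => p.1 == (j : Int) && (PySem.Int.mod p.2 2 == 1)) ∘ fun k => (k, (ms.count k : Int))))
      = ((PySem.Set.ofList ms).contains (j : Int) && (PySem.Int.mod ((ms.count (j : Int) : Int)) 2 == 1)) := by
    exact any_keyed (PySem.Set.ofList ms) (j : Int) (fun k => PySem.Int.mod ((ms.count k : Int)) 2 == 1)
  rw [this, mod_cast_two]
  have hcnt : ks.count j = ms.count (j : Int) := count_map_normIdx move n j hj hpre
  by_cases hmem : (j : Int) ∈ ms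
  · have : (PySem.Set.ofList ms).contains (j : Int) = true := by
      simp [PySem.Set.mem_ofList, hmem]
    simp [this, hcnt]
    exact fun _ => hmem
  · have hc0 : ms.count (j : Int) = 0 := List.count_eq_zero.mpr hmem
    have : (PySem.Set.ofList ms).contains (j : Int) = false := by
      simp [PySem.Set.mem_ofList, hmem]
    simp [this, hcnt, hc0]
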